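-- pv_equiv track=rewrite | github.com/SamuelPossamai/LineCodeViewer | linecodes.py | generate_ami_B8ZS_base
-- ===== SOURCE A (Python) =====
-- def generate_ami_B8ZS_base(binary_list, init_cond, is_B8ZS):
--
--     last = 1 if init_cond else -1
--     zeroes = 0
--
--     result = []
--     for bit in binary_list:
--
--         if bit:
--             zeroes = 0
--             last = -last;
--             code_value = last
--         else:
--             zeroes += 1
--             code_value = 0
--
--         result.append(code_value)
--
--         if is_B8ZS and zeroes == 8:
--             result[-5] = result[-1] = last
--             result[-4] = result[-2] = -last
--             zeroes = 0;
--
--     return result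
-- ===== SOURCE B (Python) =====
-- def generate_ami_B8ZS_base(binary_list, init_cond, is_B8ZS):
--     # Streaming rewrite: buffer a count of pending zeros and flush them
--     # (as plain zeros, or as the B8ZS substitution block) instead of
--     # appending then patching the result in place.
--     last = 1 if init_cond else -1
--     out = []
--     pending = 0
--     for bit in binary_list:
--         if bit:
--             out.extend([0] * pending)
--             pending = 0
--             last = -last
--             out.append(last)
--         else:
--             pending += 1
--             if is_B8ZS and pending == 8:
--                 out.extend([0, 0, 0, last, -last, 0, -last, last])
--                 pending = 0
--     out.extend([0] * pending)
--     return out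
-- ===== Notes on version B (the rewrite author's own statement) =====
-- stated objective: alternative
-- what changed: B streams the output with a buffered count of pending zeros flushed as plain zeros or as the B8ZS substitution block, instead of A's append-then-patch of the last eight positions via negative-index assignment.
import Mathlib
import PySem

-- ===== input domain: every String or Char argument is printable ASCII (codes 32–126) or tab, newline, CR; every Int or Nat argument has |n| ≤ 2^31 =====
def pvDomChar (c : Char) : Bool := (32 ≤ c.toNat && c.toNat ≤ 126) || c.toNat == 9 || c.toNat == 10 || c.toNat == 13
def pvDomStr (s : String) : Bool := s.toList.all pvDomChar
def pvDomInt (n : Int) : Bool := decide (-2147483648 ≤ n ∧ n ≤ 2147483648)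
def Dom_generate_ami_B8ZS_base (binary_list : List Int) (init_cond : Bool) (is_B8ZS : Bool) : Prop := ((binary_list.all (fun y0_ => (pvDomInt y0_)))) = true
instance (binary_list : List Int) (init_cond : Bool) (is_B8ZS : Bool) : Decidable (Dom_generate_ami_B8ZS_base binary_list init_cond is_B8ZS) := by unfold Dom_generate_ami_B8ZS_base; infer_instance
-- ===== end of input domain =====

-- B replaces A's append-then-patch-in-place loop by a streaming loop that buffers a
-- count of pending zeros and flushes them as plain zeros or as the B8ZS block
-- (objective: alternative decomposition, same O(n) cost).

-- ===== PORT A =====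
-- `result[i] = v` for a negative Python index i; exact whenever the index is in
-- range, which is the only way A uses it (when zeroes == 8 the result holds ≥ 8
-- trailing zeros, so indices -5..-1 exist).
def pvSetNeg (xs : List Int) (i : Int) (v : Int) : List Int :=
  xs.set ((xs.length : Int) + i).toNat v

-- one iteration of A's for-loop over (last, zeroes, result)
def pvStepA (is_B8ZS : Bool) (s : Int × Int × List Int) (bit : Int) : Int × Int × List Int :=
  let last := s.1
  let zeroes := s.2.1
  let result := s.2.2
  -- if bit: zeroes = 0; last = -last; code_value = last  else: zeroes += 1; code_value = 0
  let t : Int × Int × Int :=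
    if bit ≠ 0 then (0, -last, -last) else (zeroes + 1, last, 0)
  let zeroes := t.1
  let last := t.2.1
  let code_value := t.2.2
  let result := result ++ [code_value]
  if is_B8ZS && zeroes == 8 then
    -- result[-5] = result[-1] = last ; result[-4] = result[-2] = -last ; zeroes = 0
    let result := pvSetNeg (pvSetNeg result (-5) last) (-1) last
    let result := pvSetNeg (pvSetNeg result (-4) (-last)) (-2) (-last)
    (last, 0, result)
  else
    (last, zeroes, result)

def generate_ami_B8ZS_base (binary_list : List Int) (init_cond : Bool) (is_B8ZS : Bool) : List Int :=
  (binary_list.foldl (pvStepA is_B8ZS) ((if init_cond then 1 else -1), 0, [])).2.2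

-- ===== PORT B =====
-- one iteration of B's for-loop over (last, pending, out);
-- `[0] * pending` is List.replicate pending.toNat 0 (Python yields [] for pending < 0, as toNat does)
def pvStepB (is_B8ZS : Bool) (s : Int × Int × List Int) (bit : Int) : Int × Int × List Int :=
  let last := s.1
  let pending := s.2.1
  let out := s.2.2
  if bit ≠ 0 then
    (-last, 0, (out ++ List.replicate pending.toNat 0) ++ [-last])
  else if is_B8ZS && pending + 1 == 8 then
    (last, 0, out ++ [0, 0, 0, last, -last, 0, -last, last])
  else
    (last, pending + 1, out)

def generate_ami_B8ZS_base_alt (binary_list : List Int) (init_cond : Bool) (is_B8ZS : Bool) : List Int :=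
  let s := binary_list.foldl (pvStepB is_B8ZS) ((if init_cond then 1 else -1), 0, [])
  s.2.2 ++ List.replicate s.2.1.toNat 0

-- ===== PRECONDITION & SPEC =====
def Spec_generate_ami_B8ZS_base (binary_list : List Int) (init_cond : Bool) (is_B8ZS : Bool) (out : List Int) : Prop := out = generate_ami_B8ZS_base_alt binary_list init_cond is_B8ZS
instance (binary_list : List Int) (init_cond : Bool) (is_B8ZS : Bool) (out : List Int) : Decidable (Spec_generate_ami_B8ZS_base binary_list init_cond is_B8ZS out) := by unfold Spec_generate_ami_B8ZS_base; infer_instance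

-- ===== CLAIM (what is proved, stated in full; the proofs are below) =====
def Claim_equal_generate_ami_B8ZS_base : Prop := ∀ (binary_list : List Int) (init_cond : Bool) (is_B8ZS : Bool), Dom_generate_ami_B8ZS_base binary_list init_cond is_B8ZS → Spec_generate_ami_B8ZS_base binary_list init_cond is_B8ZS (generate_ami_B8ZS_base binary_list init_cond is_B8ZS)

-- ===== LEMMAS AND PROOFS =====

-- A's state seen through B's eyes: the pending zeros are already appended
def pvPhi (s : Int × Int × List Int) : Int × Int × List Int :=
  (s.1, s.2.1, s.2.2 ++ List.replicate s.2.1.toNat 0)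

-- the B8ZS patch of the 8 trailing zeros, computed
lemma pvPatch (o : List Int) (last : Int) :
    pvSetNeg (pvSetNeg (pvSetNeg (pvSetNeg (o ++ [0, 0, 0, 0, 0, 0, 0, 0]) (-5) last) (-1) last)
      (-4) (-last)) (-2) (-last)
      = o ++ [0, 0, 0, last, -last, 0, -last, last] := by
  simp only [pvSetNeg, List.length_set, List.length_append, List.length_cons,
    List.length_nil]
  have h5 : ((((o.length + 8 : Nat) : Int) + (-5)).toNat) = o.length + 3 := by omega
  have h1 : ((((o.length + 8 : Nat) : Int) + (-1)).toNat) = o.length + 7 := by omega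
  have h4 : ((((o.length + 8 : Nat) : Int) + (-4)).toNat) = o.length + 4 := by omega
  have h2 : ((((o.length + 8 : Nat) : Int) + (-2)).toNat) = o.length + 6 := by omega
  rw [h5, h1, h4, h2]
  rw [List.set_append_right _ _ (by omega), List.set_append_right _ _ (by omega),
    List.set_append_right _ _ (by omega), List.set_append_right _ _ (by omega)]
  congr 1
  simp only [Nat.add_sub_cancel_left, List.length_set]
  norm_num [List.set]

lemma pvStep_comm (b8 : Bool) (s : Int × Int × List Int) (bit : Int) (hp : 0 ≤ s.2.1) :
    pvStepA b8 (pvPhi s) bit = pvPhi (pvStepB b8 s bit) := by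
  obtain ⟨last, p, o⟩ := s
  simp only at hp
  by_cases hb : bit ≠ 0
  · simp [pvStepA, pvStepB, pvPhi, hb]
  · simp only [pvStepA, pvStepB, pvPhi, hb, if_false, ite_not]
    have hrep : List.replicate p.toNat (0 : Int) ++ [0] = List.replicate (p + 1).toNat 0 := by
      have : (p + 1).toNat = p.toNat + 1 := by omega
      rw [this, List.replicate_succ']
    by_cases h8 : b8 && (p + 1 == 8)
    · have hp7 : p = 7 := by
        rcases Bool.and_eq_true_iff.mp h8 with ⟨_, h⟩
        have := eq_of_beq h; omega
      subst hp7
      simp only [h8, if_true, show ((7:Int)+1).toNat = 8 from rfl,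
        show ((7:Int).toNat) = 7 from rfl, show ((0:Int).toNat) = 0 from rfl]
      rw [List.append_assoc]
      have : List.replicate 7 (0 : Int) ++ [0] = [0,0,0,0,0,0,0,0] := by decide
      rw [this, pvPatch]
      simp
    · simp only [h8, if_false]
      rw [List.append_assoc, hrep]
      simp

lemma pvFold_comm (b8 : Bool) :
    ∀ (l : List Int) (s : Int × Int × List Int), 0 ≤ s.2.1 →
      l.foldl (pvStepA b8) (pvPhi s) = pvPhi (l.foldl (pvStepB b8) s) := by
  intro l
  induction l with
  | nil => intro s _; rfl
  | cons bit rest ih =>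
    intro s hp
    have hstep := pvStep_comm b8 s bit hp
    have hp' : 0 ≤ (pvStepB b8 s bit).2.1 := by
      obtain ⟨last, p, o⟩ := s
      simp only at hp
      simp only [pvStepB]
      split_ifs <;> simp <;> omega
    simp only [List.foldl_cons, hstep, ih _ hp']

-- ===== VERDICT (by name: the statement is the Claim_ definition above) =====
theorem generate_ami_B8ZS_base_spec : Claim_equal_generate_ami_B8ZS_base := by
  intro binary_list init_cond is_B8ZS _
  unfold Spec_generate_ami_B8ZS_base generate_ami_B8ZS_base generate_ami_B8ZS_base_alt
  have h0 : ((if init_cond then (1:Int) else -1), (0:Int), ([] : List Int))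
      = pvPhi ((if init_cond then (1:Int) else -1), 0, []) := by
    simp [pvPhi]
  rw [h0, pvFold_comm is_B8ZS binary_list _ (by simp)]
  rfl
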